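-- pv_equiv track=rewrite | github.com/pypi-data/pypi-mirror-400 | packages/vibeship-mind/vibeship_mind-5.0.0-py3-none-any.whl/mind/security/scopes.py | expand_scopes
-- ===== SOURCE A (Python) =====
-- SCOPE_HIERARCHY: dict[str, set[str]] = {
--     # Admin has everything
--     "admin": {
--         "memory:read",
--         "memory:write",
--         "memory:delete",
--         "memory:*",
--         "decision:read",
--         "decision:write",
--         "decision:delete",
--         "decision:*",
--         "causal:read",
--         "causal:write",
--         "causal:*",
--         "pattern:read",
--         "pattern:write",
--         "pattern:*",
--         "admin:users",
--         "admin:metrics",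
--         "admin:dlq",
--         "admin:replay",
--     },
--     # Wildcard scopes
--     "memory:*": {"memory:read", "memory:write", "memory:delete"},
--     "decision:*": {"decision:read", "decision:write", "decision:delete"},
--     "causal:*": {"causal:read", "causal:write"},
--     "pattern:*": {"pattern:read", "pattern:write"},
--     # Write implies read
--     "memory:write": {"memory:read"},
--     "decision:write": {"decision:read"},
--     "causal:write": {"causal:read"},
--     "pattern:write": {"pattern:read"},
-- }
--
-- def expand_scopes(scopes: list[str]) -> set[str]:
--     """Expand a list of scopes to include all implied scopes.
--
--     Args:
--         scopes: List of scope strings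
--
--     Returns:
--         Set of all scopes including implied ones
--
--     Example:
--         expand_scopes(["admin"]) -> {"admin", "memory:read", "memory:write", ...}
--         expand_scopes(["memory:write"]) -> {"memory:write", "memory:read"}
--     """
--     expanded = set(scopes)
--
--     # Keep expanding until no new scopes are added
--     changed = True
--     while changed:
--         changed = False
--         for scope in list(expanded):
--             implied = SCOPE_HIERARCHY.get(scope, set())
--             new_scopes = implied - expanded
--             if new_scopes:
--                 expanded.update(new_scopes)
--                 changed = True
--
--     return expanded
-- ===== SOURCE B (Python) =====
-- SCOPE_HIERARCHY: dict[str, set[str]] = {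
--     "admin": {
--         "memory:read", "memory:write", "memory:delete", "memory:*",
--         "decision:read", "decision:write", "decision:delete", "decision:*",
--         "causal:read", "causal:write", "causal:*",
--         "pattern:read", "pattern:write", "pattern:*",
--         "admin:users", "admin:metrics", "admin:dlq", "admin:replay",
--     },
--     "memory:*": {"memory:read", "memory:write", "memory:delete"},
--     "decision:*": {"decision:read", "decision:write", "decision:delete"},
--     "causal:*": {"causal:read", "causal:write"},
--     "pattern:*": {"pattern:read", "pattern:write"},
--     "memory:write": {"memory:read"},
--     "decision:write": {"decision:read"},
--     "causal:write": {"causal:read"},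
--     "pattern:write": {"pattern:read"},
-- }
--
--
-- def expand_scopes(scopes: list[str]) -> set[str]:
--     """BFS/worklist transitive closure: each scope is enqueued and processed exactly once."""
--     expanded = set()
--     queue = []
--     for s in scopes:
--         if s not in expanded:
--             expanded.add(s)
--             queue.append(s)
--     i = 0
--     while i < len(queue):
--         for t in SCOPE_HIERARCHY.get(s := queue[i], ()):
--             if t not in expanded:
--                 expanded.add(t)
--                 queue.append(t)
--         i += 1
--     return expanded
-- ===== Notes on version B (the rewrite author's own statement) =====
-- stated objective: alternative
-- what changed: Replaced the repeat-until-no-change rescan of the whole expanded set (each pass re-looks-up every scope) with a BFS worklist that enqueues each scope once and processes it exactly once.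
import Mathlib
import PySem

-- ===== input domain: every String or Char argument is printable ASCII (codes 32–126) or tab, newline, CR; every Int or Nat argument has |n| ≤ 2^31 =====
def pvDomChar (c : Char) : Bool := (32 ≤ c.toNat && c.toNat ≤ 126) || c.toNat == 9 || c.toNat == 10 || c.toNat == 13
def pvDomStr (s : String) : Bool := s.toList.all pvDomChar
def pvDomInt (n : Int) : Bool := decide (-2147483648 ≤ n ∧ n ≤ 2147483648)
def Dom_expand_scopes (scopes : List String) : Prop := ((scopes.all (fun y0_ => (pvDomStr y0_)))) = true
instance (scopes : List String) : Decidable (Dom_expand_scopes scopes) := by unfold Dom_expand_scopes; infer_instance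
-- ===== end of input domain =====

-- B replaces A's repeat-until-no-change rescan of the whole expanded set by a BFS worklist
-- that enqueues and processes each scope exactly once (objective: alternative algorithm, same cost).
-- Both Pythons return a set; per the type convention both ports return its element list, and the
-- theorem proves the two lists equal (hence a fortiori equal as sets).

-- ===== PORT A =====
-- SCOPE_HIERARCHY, the shared module-level constant (dict of set literals; value order = source
-- order; results are only ever consumed as sets, so the unmodelled hash order of the Python set
-- literals is immaterial).
def pvHierList : List (String × PySem.Set String) :=
  [ ("admin", PySem.Set.ofList ["memory:read","memory:write","memory:delete","memory:*",
      "decision:read","decision:write","decision:delete","decision:*",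
      "causal:read","causal:write","causal:*",
      "pattern:read","pattern:write","pattern:*",
      "admin:users","admin:metrics","admin:dlq","admin:replay"]),
    ("memory:*", PySem.Set.ofList ["memory:read","memory:write","memory:delete"]),
    ("decision:*", PySem.Set.ofList ["decision:read","decision:write","decision:delete"]),
    ("causal:*", PySem.Set.ofList ["causal:read","causal:write"]),
    ("pattern:*", PySem.Set.ofList ["pattern:read","pattern:write"]),
    ("memory:write", PySem.Set.ofList ["memory:read"]),
    ("decision:write", PySem.Set.ofList ["decision:read"]),
    ("causal:write", PySem.Set.ofList ["causal:read"]),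
    ("pattern:write", PySem.Set.ofList ["pattern:read"]) ]

def pvHier : PySem.Dict String (PySem.Set String) := PySem.Dict.mk pvHierList

-- SCOPE_HIERARCHY.get(scope, set())
def pvImplied (scope : String) : PySem.Set String :=
  PySem.Dict.getD pvHier scope (PySem.Set.ofList [])

-- all hierarchy values, concatenated (termination measure only)
def pvAllValues : List String := (pvHierList.map Prod.snd).flatten

-- the body of A's inner 'for scope in list(expanded)' loop
def pvStepA (st : PySem.Set String × Bool) (scope : String) : PySem.Set String × Bool :=
  let implied := pvImplied scope
  let newScopes := PySem.Set.diff implied st.1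
  if newScopes.isEmpty then st
  else (PySem.Set.update st.1 newScopes, true)

-- ─── termination support (cited by the ports' decreasing_by; the equivalence proofs are below the claim) ───
theorem pv_getD_cases (l : List (String × PySem.Set String)) (s : String) :
    (PySem.Dict.mk l).getD s (PySem.Set.ofList []) = [] ∨
      (s, (PySem.Dict.mk l).getD s (PySem.Set.ofList [])) ∈ l := by
  induction l with
  | nil => left; rfl
  | cons kv rest ih =>
    rw [PySem.Dict.getD_eq_get?_getD, PySem.Dict.get?_mk_cons]
    by_cases h : kv.1 == s
    · right
      simp only [h, if_true, Option.getD_some]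
      have hk : kv.1 = s := by simpa using h
      have : kv = (s, kv.2) := by rw [← hk]
      rw [← this]
      exact List.mem_cons_self
    · simp only [h, Bool.false_eq_true, if_false]
      rw [← PySem.Dict.getD_eq_get?_getD]
      rcases ih with h1 | h1
      · left; exact h1
      · right; exact List.mem_cons_of_mem _ h1

theorem pv_implied_nodup (s : String) : (pvImplied s).Nodup := by
  have h := pv_getD_cases pvHierList s
  unfold pvImplied pvHier
  rcases h with h | h
  · rw [h]; exact List.nodup_nil
  · have hall : ∀ kv ∈ pvHierList, (kv.2 : List String).Nodup := by decide
    exact hall _ h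

theorem pv_implied_sub_all {s x : String} (hx : x ∈ pvImplied s) : x ∈ pvAllValues := by
  have h := pv_getD_cases pvHierList s
  unfold pvImplied pvHier at hx
  rcases h with h | h
  · rw [h] at hx; simp at hx
  · unfold pvAllValues
    rw [List.mem_flatten]
    exact ⟨_, List.mem_map_of_mem h, hx⟩

theorem pv_update_append (nw acc : List String) (hn : nw.Nodup)
    (hd : ∀ x ∈ nw, acc.contains x = false) :
    PySem.Set.update acc nw = acc ++ nw := by
  induction nw generalizing acc with
  | nil => simp [PySem.Set.update]
  | cons a t ih =>
    have ha := hd a List.mem_cons_self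
    have ha' : a ∉ acc := by simpa [List.contains_eq_mem] using ha
    obtain ⟨hat, htn⟩ := List.nodup_cons.mp hn
    have step : PySem.Set.update acc (a :: t) = PySem.Set.update (acc ++ [a]) t := by
      simp [PySem.Set.update, PySem.Set.add, ha']
    rw [step, ih (acc ++ [a]) htn]
    · simp
    · intro x hxt
      have hxa : x ≠ a := fun he => hat (he ▸ hxt)
      have hc := hd x (List.mem_cons_of_mem _ hxt)
      simp only [List.contains_eq_mem, decide_eq_false_iff_not] at hc ⊢
      simp [hxa, hc]

theorem pv_lf_lt {α} (l : List α) (p q : α → Bool) (hpq : ∀ y, p y = true → q y = true) :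
    ∀ {x}, x ∈ l → q x = true → p x = false →
    (l.filter p).length < (l.filter q).length := by
  induction l with
  | nil => intro x hx; simp at hx
  | cons a l ih =>
    intro x hx hqx hpx
    rcases List.mem_cons.mp hx with rfl | hx'
    · simp only [List.filter_cons, hpx, hqx]
      simp only [Bool.false_eq_true, if_false, if_true, List.length_cons]
      have : (l.filter p).length ≤ (l.filter q).length := by
        apply List.Sublist.length_le
        exact List.monotone_filter_right l (by intro y hy; exact hpq y hy)
      omega
    · by_cases hpa : p a = true
      · have hqa := hpq a hpa
        simp only [List.filter_cons, hpa, hqa, if_true, List.length_cons]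
        exact Nat.succ_lt_succ (ih hx' hqx hpx)
      · simp only [List.filter_cons, Bool.not_eq_true] at *
        rw [hpa]
        have h1 := ih hx' hqx hpx
        cases hqa : q a <;> simp <;> omega

theorem pv_filter_strict {l S e : List String} {x : String}
    (hxl : x ∈ l) (hxe : x ∈ e) (hxS : S.contains x = false) :
    (l.filter fun y => !(S ++ e).contains y).length <
      (l.filter fun y => !S.contains y).length := by
  refine pv_lf_lt l _ _ ?_ hxl ?_ ?_
  · intro y hy
    simp only [List.contains_append, Bool.not_or, Bool.and_eq_true] at hy
    exact hy.1
  · simpa [List.contains_eq_mem] using hxS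
  · simp [List.contains_eq_mem, hxe]

theorem pv_foldA_prefix (q : List String) (st : PySem.Set String × Bool) :
    ∃ e, (q.foldl pvStepA st).1 = st.1 ++ e ∧
      (∀ x ∈ e, st.1.contains x = false ∧ x ∈ pvAllValues) ∧
      (q.foldl pvStepA st).2 = (st.2 || !e.isEmpty) := by
  induction q generalizing st with
  | nil => exact ⟨[], by simp⟩
  | cons s q ih =>
    rw [List.foldl_cons]
    by_cases hemp : (PySem.Set.diff (pvImplied s) st.1).isEmpty
    · have hstep : pvStepA st s = st := by simp [pvStepA, hemp]
      rw [hstep]; exact ih st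
    · have hdiff : PySem.Set.diff (pvImplied s) st.1
          = (pvImplied s).filter (fun x => !st.1.contains x) := rfl
      rw [hdiff] at hemp
      have hnodup : ((pvImplied s).filter (fun x => !st.1.contains x)).Nodup :=
        (pv_implied_nodup s).filter _
      have hdisj : ∀ x ∈ (pvImplied s).filter (fun x => !st.1.contains x),
          st.1.contains x = false := by
        intro x hx
        have := (List.mem_filter.mp hx).2
        simpa using this
      have hstep : pvStepA st s
          = (st.1 ++ (pvImplied s).filter (fun x => !st.1.contains x), true) := by
        simp only [pvStepA, hdiff]
        rw [if_neg hemp, pv_update_append _ _ hnodup hdisj]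
      rw [hstep]
      obtain ⟨e', h1, h2, h3⟩ := ih (st.1 ++ (pvImplied s).filter (fun x => !st.1.contains x), true)
      refine ⟨(pvImplied s).filter (fun x => !st.1.contains x) ++ e', ?_, ?_, ?_⟩
      · rw [h1]; simp
      · intro x hx
        rcases List.mem_append.mp hx with hx' | hx'
        · exact ⟨hdisj x hx', pv_implied_sub_all (List.mem_filter.mp hx').1⟩
        · have hc : (st.1 ++ (pvImplied s).filter (fun x => !st.1.contains x)).contains x = false :=
            (h2 x hx').1
          simp only [PySem.Set.contains_eq_listContains, List.contains_eq_mem,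
            List.mem_append, decide_eq_false_iff_not, not_or] at hc
          exact ⟨by simp [PySem.Set.contains_eq_listContains, List.contains_eq_mem, hc.1],
            (h2 x hx').2⟩
      · rw [h3]
        rcases hfe : (pvImplied s).filter (fun x => !st.1.contains x) with _ | ⟨a, t⟩
        · rw [hfe] at hemp; simp at hemp
        · simp

-- the while-changed loop: one call = one pass over a snapshot of expanded
def pvLoopA (expanded : PySem.Set String) : PySem.Set String :=
  let r := expanded.foldl pvStepA (expanded, false)
  if h : r.2 = true then pvLoopA r.1 else r.1
  termination_by (pvAllValues.filter fun x => !expanded.contains x).length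
  decreasing_by
    simp only [r, List.foldl_attach] at h ⊢
    obtain ⟨e, h1, h2, h3⟩ := pv_foldA_prefix expanded (expanded, false)
    rw [h3] at h
    simp only [Bool.false_or] at h
    have he : e ≠ [] := by
      intro hnil; rw [hnil] at h; simp at h
    obtain ⟨x, hx⟩ := List.exists_mem_of_ne_nil e he
    rw [h1]
    exact pv_filter_strict (hxe := hx) (hxl := (h2 x hx).2) (hxS := (h2 x hx).1)

def expand_scopes (scopes : List String) : List String :=
  pvLoopA (PySem.Set.ofList scopes)

-- ===== PORT B =====
-- the body of B's 'if s not in expanded: expanded.add(s); queue.append(s)' (seeding and inner loop)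
def pvSeedStep (st : List String × List String) (s : String) : List String × List String :=
  if st.1.contains s then st else (st.1 ++ [s], st.2 ++ [s])

theorem pv_insFold (l : List String) (seen buf : List String) (hl : l.Nodup) :
    l.foldl pvSeedStep (seen, buf) =
      (seen ++ l.filter (fun t => !seen.contains t),
       buf ++ l.filter (fun t => !seen.contains t)) := by
  induction l generalizing seen buf with
  | nil => simp
  | cons t rest ih =>
    obtain ⟨htr, hrn⟩ := List.nodup_cons.mp hl
    rw [List.foldl_cons]
    by_cases h : seen.contains t
    · have h' : t ∈ seen := by simpa [List.contains_eq_mem] using h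
      have hstep : pvSeedStep (seen, buf) t = (seen, buf) := by simp [pvSeedStep, h']
      rw [hstep, ih seen buf hrn, List.filter_cons]
      simp [h']
    · have h' : t ∉ seen := by simpa [List.contains_eq_mem] using h
      have hstep : pvSeedStep (seen, buf) t = (seen ++ [t], buf ++ [t]) := by
        simp [pvSeedStep, h']
      rw [hstep, ih _ _ hrn, List.filter_cons]
      have hcong : rest.filter (fun x => !(seen ++ [t]).contains x)
          = rest.filter (fun x => !seen.contains x) := by
        apply List.filter_congr
        intro x hx
        have hxt : x ≠ t := fun he => htr (he ▸ hx)
        simp [List.contains_eq_mem, hxt]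
      rw [hcong]
      simp [h']

-- B's worklist loop; the Python index i walking the queue becomes structural recursion on the
-- unprocessed suffix queue[i:], with freshly enqueued scopes appended at the end.
def pvGo (seen : List String) (queue : List String) : List String :=
  match queue with
  | [] => seen
  | s :: rest =>
    let st := (pvImplied s).foldl pvSeedStep (seen, [])
    pvGo st.1 (rest ++ st.2)
  termination_by ((pvAllValues.filter fun x => !seen.contains x).length, queue.length)
  decreasing_by
    rw [pv_insFold _ _ _ (pv_implied_nodup s)]
    simp only [List.nil_append]
    by_cases hnw : (pvImplied s).filter (fun t => !seen.contains t) = []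
    · rw [hnw]
      simp only [List.append_nil]
      exact Prod.Lex.right _ (by simp)
    · obtain ⟨x, hx⟩ := List.exists_mem_of_ne_nil _ hnw
      apply Prod.Lex.left
      have hxi : x ∈ pvImplied s := (List.mem_filter.mp hx).1
      have hxS : seen.contains x = false := by
        have := (List.mem_filter.mp hx).2; simpa using this
      exact pv_filter_strict (hxl := pv_implied_sub_all hxi) (hxe := hx) (hxS := hxS)

def expand_scopes_alt (scopes : List String) : List String :=
  let st := scopes.foldl pvSeedStep ([], [])
  pvGo st.1 st.2

-- ===== PRECONDITION & SPEC =====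
def Spec_expand_scopes (scopes : List String) (out : List String) : Prop := out = expand_scopes_alt scopes
instance (scopes : List String) (out : List String) : Decidable (Spec_expand_scopes scopes out) := by unfold Spec_expand_scopes; infer_instance

-- ===== CLAIM (what is proved, stated in full; the proofs are below) =====
def Claim_equal_expand_scopes : Prop := ∀ (scopes : List String), Dom_expand_scopes scopes → Spec_expand_scopes scopes (expand_scopes scopes)

-- ===== LEMMAS AND PROOFS =====

-- the single pass over a queue q starting from `seen` that both programs compute
def pvF (seen : List String) (q : List String) : List String :=
  q.foldl (fun acc s => acc ++ (pvImplied s).filter (fun t => !acc.contains t)) seen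

-- SCOPE_HIERARCHY's value sets are already transitively closed (checked by computation on the table)
theorem pv_closed {s t y : String} (ht : t ∈ pvImplied s) (hy : y ∈ pvImplied t) :
    y ∈ pvImplied s := by
  have hcore : ∀ kv ∈ pvHierList, ∀ u ∈ (kv.2 : List String), ∀ z ∈ pvImplied u, z ∈ kv.2 := by
    decide
  have h := pv_getD_cases pvHierList s
  unfold pvImplied pvHier at ht ⊢
  rcases h with h | h
  · rw [h] at ht; simp at ht
  · exact hcore _ h t ht y hy

theorem pv_foldA_fst (q : List String) (st : PySem.Set String × Bool) :
    (q.foldl pvStepA st).1 = pvF st.1 q := by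
  induction q generalizing st with
  | nil => rfl
  | cons s q ih =>
    rw [List.foldl_cons]
    have hdiff : PySem.Set.diff (pvImplied s) st.1
        = (pvImplied s).filter (fun x => !st.1.contains x) := rfl
    by_cases hemp : (PySem.Set.diff (pvImplied s) st.1).isEmpty
    · have hstep : pvStepA st s = st := by simp [pvStepA, hemp]
      have hnil : (pvImplied s).filter (fun x => !st.1.contains x) = [] := by
        rw [← hdiff]; exact List.isEmpty_iff.mp hemp
      rw [hstep, ih st]
      have hr : pvF st.1 (s :: q)
          = pvF (st.1 ++ (pvImplied s).filter (fun x => !st.1.contains x)) q := rfl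
      rw [hr, hnil, List.append_nil]
    · have hnodup : ((pvImplied s).filter (fun x => !st.1.contains x)).Nodup :=
        (pv_implied_nodup s).filter _
      have hdisj : ∀ x ∈ (pvImplied s).filter (fun x => !st.1.contains x),
          st.1.contains x = false := by
        intro x hx
        have := (List.mem_filter.mp hx).2
        simpa using this
      have hstep : pvStepA st s
          = (st.1 ++ (pvImplied s).filter (fun x => !st.1.contains x), true) := by
        simp only [pvStepA, hdiff]
        rw [if_neg (by rw [← hdiff]; exact hemp), pv_update_append _ _ hnodup hdisj]
      rw [hstep, ih]
      rfl

theorem pv_foldA_mono (q : List String) (st : PySem.Set String × Bool) (h : st.2 = true) :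
    (q.foldl pvStepA st).2 = true := by
  induction q generalizing st with
  | nil => exact h
  | cons s q ih =>
    rw [List.foldl_cons]
    by_cases hemp : (PySem.Set.diff (pvImplied s) st.1).isEmpty
    · have hstep : pvStepA st s = st := by simp [pvStepA, hemp]
      rw [hstep]; exact ih st h
    · have hstep : (pvStepA st s).2 = true := by simp [pvStepA, hemp]
      exact ih _ hstep

theorem pv_foldA_nochange (q : List String) (st : PySem.Set String × Bool)
    (h : (q.foldl pvStepA st).2 = false) : q.foldl pvStepA st = st := by
  induction q generalizing st with
  | nil => rfl
  | cons s q ih =>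
    rw [List.foldl_cons] at h ⊢
    by_cases hemp : (PySem.Set.diff (pvImplied s) st.1).isEmpty
    · have hstep : pvStepA st s = st := by simp [pvStepA, hemp]
      rw [hstep] at h ⊢; exact ih st h
    · exfalso
      have hstep : (pvStepA st s).2 = true := by simp [pvStepA, hemp]
      have := pv_foldA_mono q _ hstep
      rw [this] at h; simp at h

theorem pv_mem_F (q : List String) (seen : List String) {x : String} (hx : x ∈ seen) :
    x ∈ pvF seen q := by
  induction q generalizing seen with
  | nil => exact hx
  | cons s q ih =>
    have : x ∈ seen ++ (pvImplied s).filter (fun t => !seen.contains t) :=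
      List.mem_append_left _ hx
    exact ih _ this

theorem pv_H_sub_F (q : List String) (seen : List String) {s x : String}
    (hs : s ∈ q) (hx : x ∈ pvImplied s) : x ∈ pvF seen q := by
  induction q generalizing seen with
  | nil => simp at hs
  | cons a q ih =>
    rcases List.mem_cons.mp hs with rfl | hs'
    · show x ∈ pvF (seen ++ (pvImplied s).filter (fun t => !seen.contains t)) q
      apply pv_mem_F
      by_cases hc : seen.contains x
      · exact List.mem_append_left _ (by simpa [List.contains_eq_mem] using hc)
      · apply List.mem_append_right
        rw [List.mem_filter]
        exact ⟨hx, by simpa using hc⟩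
    · exact ih _ hs'

theorem pv_F_sub (q : List String) (seen : List String) {x : String} (hx : x ∈ pvF seen q) :
    x ∈ seen ∨ ∃ s ∈ q, x ∈ pvImplied s := by
  induction q generalizing seen with
  | nil => exact Or.inl hx
  | cons s q ih =>
    rcases ih _ hx with h | ⟨t, ht, hxt⟩
    · rcases List.mem_append.mp h with h' | h'
      · exact Or.inl h'
      · exact Or.inr ⟨s, List.mem_cons_self, (List.mem_filter.mp h').1⟩
    · exact Or.inr ⟨t, List.mem_cons_of_mem _ ht, hxt⟩

theorem pv_F_sat (S : List String) {x y : String} (hx : x ∈ pvF S S) (hy : y ∈ pvImplied x) :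
    y ∈ pvF S S := by
  rcases pv_F_sub S S hx with h | ⟨s, hs, hxs⟩
  · exact pv_H_sub_F S S h hy
  · exact pv_H_sub_F S S hs (pv_closed hxs hy)

theorem pv_F_fixed (q : List String) (seen : List String)
    (h : ∀ s ∈ q, ∀ x ∈ pvImplied s, x ∈ seen) : pvF seen q = seen := by
  induction q generalizing seen with
  | nil => rfl
  | cons s q ih =>
    have hnil : (pvImplied s).filter (fun t => !seen.contains t) = [] := by
      rw [List.filter_eq_nil_iff]
      intro t htI
      have := h s List.mem_cons_self t htI
      simp [List.contains_eq_mem, this]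
    show pvF (seen ++ (pvImplied s).filter (fun t => !seen.contains t)) q = seen
    rw [hnil, List.append_nil]
    exact ih seen (fun t ht => h t (List.mem_cons_of_mem _ ht))

theorem pv_loopA_eq (S : PySem.Set String) : pvLoopA S = pvF S S := by
  rw [pvLoopA]
  by_cases h : (List.foldl pvStepA (S, false) S).2 = true
  · rw [dif_pos h, pv_foldA_fst S (S, false)]
    rw [pvLoopA]
    have hsat : ∀ s ∈ pvF S S, ∀ x ∈ pvImplied s, x ∈ pvF S S :=
      fun s hs x hx => pv_F_sat S hs hx
    have hfix : pvF (pvF S S) (pvF S S) = pvF S S := pv_F_fixed _ _ hsat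
    have hfst2 : (List.foldl pvStepA (pvF S S, false) (pvF S S)).1 = pvF S S := by
      rw [pv_foldA_fst]; exact hfix
    have hsnd : (List.foldl pvStepA (pvF S S, false) (pvF S S)).2 = false := by
      obtain ⟨e, h1, _, h3⟩ := pv_foldA_prefix (pvF S S) (pvF S S, false)
      have he : e = [] := by
        have h4 : pvF S S ++ e = pvF S S := by rw [← h1]; exact hfst2
        exact List.append_right_eq_self.mp h4
      rw [h3, he]; rfl
    rw [dif_neg (by simp [hsnd]), hfst2]
  · rw [dif_neg h]
    have hb : (List.foldl pvStepA (S, false) S).2 = false := by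
      cases hb2 : (List.foldl pvStepA (S, false) S).2
      · rfl
      · exact absurd hb2 h
    have hnc := pv_foldA_nochange S (S, false) hb
    have h1 : (List.foldl pvStepA (S, false) S).1 = S := by rw [hnc]
    have h2 := pv_foldA_fst S (S, false)
    rw [h1] at h2
    rw [h1, ← h2]

theorem pv_go_sat (extra : List String) (seen : List String)
    (h : ∀ t ∈ extra, ∀ y ∈ pvImplied t, y ∈ seen) : pvGo seen extra = seen := by
  induction extra with
  | nil => rw [pvGo]
  | cons t rest ih =>
    rw [pvGo, pv_insFold _ _ _ (pv_implied_nodup t)]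
    have hnil : (pvImplied t).filter (fun y => !seen.contains y) = [] := by
      rw [List.filter_eq_nil_iff]
      intro y hyI
      have := h t List.mem_cons_self y hyI
      simp [List.contains_eq_mem, this]
    simp only [hnil, List.append_nil]
    exact ih (fun u hu => h u (List.mem_cons_of_mem _ hu))

theorem pv_go_main (q : List String) (extra seen : List String)
    (h : ∀ t ∈ extra, ∀ y ∈ pvImplied t, y ∈ pvF seen q) :
    pvGo seen (q ++ extra) = pvF seen q := by
  induction q generalizing seen extra with
  | nil =>
    rw [List.nil_append]
    exact pv_go_sat extra seen h
  | cons s restq ih =>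
    rw [List.cons_append, pvGo, pv_insFold _ _ _ (pv_implied_nodup s)]
    set nw := (pvImplied s).filter (fun t => !seen.contains t) with hnw
    simp only [List.nil_append]
    have hFstep : pvF seen (s :: restq) = pvF (seen ++ nw) restq := by
      rw [hnw]; rfl
    rw [List.append_assoc, hFstep]
    apply ih (extra ++ nw) (seen ++ nw)
    intro t ht y hy
    rcases List.mem_append.mp ht with ht' | ht'
    · have := h t ht' y hy
      rw [hFstep] at this
      exact this
    · have htI : t ∈ pvImplied s := (List.mem_filter.mp ht').1
      have hyI : y ∈ pvImplied s := pv_closed htI hy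
      apply pv_mem_F
      by_cases hc : seen.contains y
      · exact List.mem_append_left _ (by simpa [List.contains_eq_mem] using hc)
      · apply List.mem_append_right
        rw [hnw, List.mem_filter]
        exact ⟨hyI, by simpa using hc⟩

theorem pv_seed_eq (scopes : List String) (a : List String) :
    scopes.foldl pvSeedStep (a, a) =
      (scopes.foldl PySem.Set.add a, scopes.foldl PySem.Set.add a) := by
  induction scopes generalizing a with
  | nil => rfl
  | cons s rest ih =>
    rw [List.foldl_cons, List.foldl_cons]
    by_cases h : a.contains s
    · have h' : s ∈ a := by simpa [List.contains_eq_mem] using h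
      have h1 : pvSeedStep (a, a) s = (a, a) := by simp [pvSeedStep, h']
      have h2 : PySem.Set.add a s = a := by simp [PySem.Set.add, h']
      rw [h1, h2]; exact ih a
    · have h' : s ∉ a := by simpa [List.contains_eq_mem] using h
      have h1 : pvSeedStep (a, a) s = (a ++ [s], a ++ [s]) := by simp [pvSeedStep, h']
      have h2 : PySem.Set.add a s = a ++ [s] := by simp [PySem.Set.add, h']
      rw [h1, h2]; exact ih (a ++ [s])

-- ===== VERDICT (by name: the statement is the Claim_ definition above) =====
theorem expand_scopes_spec : Claim_equal_expand_scopes := by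
  intro scopes _
  unfold Spec_expand_scopes expand_scopes expand_scopes_alt
  rw [pv_loopA_eq]
  have hof : PySem.Set.ofList scopes = scopes.foldl PySem.Set.add [] := rfl
  rw [pv_seed_eq scopes []]
  have hmain := pv_go_main (scopes.foldl PySem.Set.add []) [] (scopes.foldl PySem.Set.add [])
    (by intro t ht; simp at ht)
  rw [List.append_nil] at hmain
  rw [hof, ← hmain]
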